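-- pv_equiv track=rewrite | github.com/KonstantinosAng/CodeWars | Python/[6 kyu] Simple Fun #305 Typist.py | typist
-- ===== SOURCE A (Python) =====
-- def typist(s):
--   caps, count = False, 0
--   for letter in s:
--     if letter.lower() == letter:
--       if caps:
--         caps = False
--         count += 1
--       count += 1
--     else:
--       if not caps:
--         caps = True
--         count += 1
--       count += 1
--   return count
-- ===== SOURCE B (Python) =====
-- def typist(s):
--     # Run-based counting: base cost is len(s); each maximal run of
--     # uppercase characters costs one extra keystroke to switch caps on,
--     # and one more to switch it off unless the run ends the string.
--     n = len(s)
--     toggles = 0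
--     i = 0
--     while i < n:
--         while i < n and s[i] == s[i].lower():
--             i += 1
--         if i < n:
--             toggles += 1
--             while i < n and s[i] != s[i].lower():
--                 i += 1
--             if i < n:
--                 toggles += 1
--     return n + toggles
-- ===== Notes on version B (the rewrite author's own statement) =====
-- stated objective: alternative
-- what changed: Replaces A's per-character caps/count accumulator with a run-skipping scan: B counts maximal uppercase runs (each interior run costs 2 toggles, a trailing run costs 1) using nested index-advancing while loops, and returns len(s) + toggles.
import Mathlib
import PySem

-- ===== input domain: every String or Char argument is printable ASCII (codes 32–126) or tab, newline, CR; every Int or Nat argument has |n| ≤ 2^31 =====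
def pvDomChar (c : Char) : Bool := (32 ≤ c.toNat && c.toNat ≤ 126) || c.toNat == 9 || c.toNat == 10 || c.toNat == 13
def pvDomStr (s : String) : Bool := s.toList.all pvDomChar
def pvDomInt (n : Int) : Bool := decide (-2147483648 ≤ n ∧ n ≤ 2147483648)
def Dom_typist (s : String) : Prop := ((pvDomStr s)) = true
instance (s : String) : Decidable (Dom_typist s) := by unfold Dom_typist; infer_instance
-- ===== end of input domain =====

-- B replaces A's per-character caps/count accumulator by a run-skipping scan:
-- len(s) plus 2 per interior maximal uppercase run and 1 for a trailing one.

-- ===== PORT A =====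
-- loop body of A (one letter: update caps, add the keystrokes)
def typistStep (st : Bool × Int) (letter : Char) : Bool × Int :=
  let caps := st.1
  let count := st.2
  if PySem.Chars.lowerChar letter == letter then
    if caps then (false, count + 1 + 1) else (caps, count + 1)
  else
    if !caps then (true, count + 1 + 1) else (caps, count + 1)

def typist (s : String) : Int :=
  (s.toList.foldl typistStep (false, 0)).2

-- ===== PORT B =====
-- B's inner loop `while i < n and s[i] == s[i].lower(): i += 1` (advance past lowercase-class chars)
def typistSkipLow : List Char → List Char
  | [] => []
  | c :: cs => if PySem.Chars.lowerChar c == c then typistSkipLow cs else c :: cs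

-- B's inner loop `while i < n and s[i] != s[i].lower(): i += 1` (advance past uppercase chars)
def typistSkipUp : List Char → List Char
  | [] => []
  | c :: cs => if PySem.Chars.lowerChar c != c then typistSkipUp cs else c :: cs

lemma typistSkipLow_le (cs : List Char) : (typistSkipLow cs).length ≤ cs.length := by
  induction cs with
  | nil => simp [typistSkipLow]
  | cons c cs ih => simp only [typistSkipLow]; split <;> simp_all; omega

lemma typistSkipUp_le (cs : List Char) : (typistSkipUp cs).length ≤ cs.length := by
  induction cs with
  | nil => simp [typistSkipUp]
  | cons c cs ih => simp only [typistSkipUp]; split <;> simp_all; omega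

lemma typistSkipLow_head {cs : List Char} {c : Char} {t : List Char}
    (h : typistSkipLow cs = c :: t) : (PySem.Chars.lowerChar c == c) = false := by
  induction cs with
  | nil => simp [typistSkipLow] at h
  | cons d cs ih =>
    simp only [typistSkipLow] at h
    split at h
    · exact ih h
    · cases h; simpa using ‹¬ (PySem.Chars.lowerChar c == c) = true›

lemma typistSkipLow_lt {cs : List Char} {c : Char} {t : List Char}
    (h : typistSkipLow cs = c :: t) : (typistSkipUp (c :: t)).length < cs.length := by
  have hc := typistSkipLow_head h
  have h1 : typistSkipUp (c :: t) = typistSkipUp t := by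
    simp [typistSkipUp, bne, hc]
  rw [h1]
  have h2 := typistSkipUp_le t
  have h3 := typistSkipLow_le cs
  rw [h] at h3
  simp only [List.length_cons] at h3
  omega

-- B's outer while loop: the `toggles` accumulated from the rest of the string
def typistRuns : List Char → Int
  | cs =>
    match h1 : typistSkipLow cs with
    | [] => 0
    | c :: cs1 =>
      match h2 : typistSkipUp (c :: cs1) with
      | [] => 1
      | d :: cs2 => 2 + typistRuns (d :: cs2)
termination_by cs => cs.length
decreasing_by
  have := typistSkipLow_lt h1
  rw [h2] at this
  simpa using this

def typist_alt (s : String) : Int :=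
  (s.toList.length : Int) + typistRuns s.toList

-- ===== PRECONDITION & SPEC =====
def Spec_typist (s : String) (out : Int) : Prop := out = typist_alt s
instance (s : String) (out : Int) : Decidable (Spec_typist s out) := by unfold Spec_typist; infer_instance

-- ===== CLAIM (what is proved, stated in full; the proofs are below) =====
def Claim_equal_typist : Prop := ∀ (s : String), Dom_typist s → Spec_typist s (typist s)

-- ===== LEMMAS AND PROOFS =====

/-- Reference: number of class transitions in `us`, previous class `prev`. -/
def pvTrans (prev : Bool) : List Bool → Int
  | [] => 0
  | u :: us => (if prev != u then 1 else 0) + pvTrans u us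

def pvUp (c : Char) : Bool := PySem.Chars.lowerChar c != c

lemma pvFoldA_eq (l : List Char) : ∀ (caps : Bool) (count : Int),
    (l.foldl typistStep (caps, count)).2
    = count + l.length + pvTrans caps (l.map pvUp) := by
  induction l with
  | nil => intro caps count; simp [pvTrans]
  | cons c l ih =>
    intro caps count
    rw [List.foldl_cons]
    by_cases h : PySem.Chars.lowerChar c = c
    · cases caps <;>
        simp only [typistStep, h, beq_self_eq_true, if_true, Bool.false_eq_true, if_false,
          Bool.not_false, ih, List.map_cons, pvTrans, List.length_cons, pvUp, bne_self_eq_false] <;> norm_num <;> try ring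
    · have h' : (PySem.Chars.lowerChar c == c) = false := by simp [h]
      have h'' : (PySem.Chars.lowerChar c != c) = true := by simp [bne, h']
      cases caps <;>
        simp only [typistStep, h', if_false, if_true, Bool.not_false, Bool.not_true,
          Bool.false_eq_true, ih, List.map_cons, pvTrans, List.length_cons, pvUp, h''] <;> norm_num <;> try ring

-- skipping lowercase-class chars with previous class `false` contributes no transitions
lemma pvTrans_skipLow (cs : List Char) :
    pvTrans false (cs.map pvUp) = pvTrans false ((typistSkipLow cs).map pvUp) := by
  induction cs with
  | nil => simp [typistSkipLow]
  | cons c cs ih =>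
    simp only [typistSkipLow]
    by_cases h : (PySem.Chars.lowerChar c == c) = true
    · have hu : pvUp c = false := by simp [pvUp, bne, h]
      simp [pvTrans, hu, ih, h]
    · simp [h]

-- skipping uppercase chars with previous class `true` contributes no transitions
lemma pvTrans_skipUp (cs : List Char) :
    pvTrans true (cs.map pvUp) = pvTrans true ((typistSkipUp cs).map pvUp) := by
  induction cs with
  | nil => simp [typistSkipUp]
  | cons c cs ih =>
    simp only [typistSkipUp]
    by_cases h : (PySem.Chars.lowerChar c != c) = true
    · have hu : pvUp c = true := h
      simp [pvTrans, hu, ih, h]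
    · simp [h]

lemma typistSkipUp_head {cs : List Char} {c : Char} {t : List Char}
    (h : typistSkipUp cs = c :: t) : (PySem.Chars.lowerChar c != c) = false := by
  induction cs with
  | nil => simp [typistSkipUp] at h
  | cons d cs ih =>
    simp only [typistSkipUp] at h
    split at h
    · exact ih h
    · cases h; simpa using ‹¬ (PySem.Chars.lowerChar c != c) = true›

-- unfolding facts for B's outer loop, one per branch
lemma typistRuns_nil {cs : List Char} (h1 : typistSkipLow cs = []) :
    typistRuns cs = 0 := by
  rw [typistRuns]; split
  · rfl
  · rename_i c cs1 heq; rw [h1] at heq; cases heq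

lemma typistRuns_one {cs : List Char} {c : Char} {cs1 : List Char}
    (h1 : typistSkipLow cs = c :: cs1) (h2 : typistSkipUp (c :: cs1) = []) :
    typistRuns cs = 1 := by
  rw [typistRuns]; split
  · rename_i heq; rw [h1] at heq; cases heq
  · rename_i c' cs1' heq
    rw [h1] at heq
    injection heq with e1 e2; subst e1; subst e2
    split
    · rfl
    · rename_i d' cs2' heq2; rw [h2] at heq2; cases heq2

lemma typistRuns_cons {cs : List Char} {c d : Char} {cs1 cs2 : List Char}
    (h1 : typistSkipLow cs = c :: cs1) (h2 : typistSkipUp (c :: cs1) = d :: cs2) :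
    typistRuns cs = 2 + typistRuns (d :: cs2) := by
  rw [typistRuns]; split
  · rename_i heq; rw [h1] at heq; cases heq
  · rename_i c' cs1' heq
    rw [h1] at heq
    injection heq with e1 e2; subst e1; subst e2
    split
    · rename_i heq2; rw [h2] at heq2; cases heq2
    · rename_i d' cs2' heq2
      rw [h2] at heq2
      injection heq2 with e3 e4; subst e3; subst e4
      rfl

lemma pvRuns_eq_trans (cs : List Char) :
    typistRuns cs = pvTrans false (cs.map pvUp) := by
  induction cs using typistRuns.induct with
  | case1 cs _cs h1 =>
    rw [typistRuns_nil h1, pvTrans_skipLow, h1]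
    simp [pvTrans]
  | case2 cs _cs c cs1 h1 h2 =>
    rw [typistRuns_one h1 h2]
    have hc' : (PySem.Chars.lowerChar c != c) = true := by
      have := typistSkipLow_head h1; simp [bne, this]
    have hc : pvUp c = true := hc'
    have h2' : typistSkipUp cs1 = [] := by
      have he : typistSkipUp (c :: cs1) = typistSkipUp cs1 := by
        simp [typistSkipUp, hc']
      rw [← he, h2]
    rw [pvTrans_skipLow, h1]
    simp only [List.map_cons, pvTrans, hc]
    rw [pvTrans_skipUp cs1, h2']
    simp [pvTrans]
  | case3 cs _cs c cs1 h1 d cs2 h2 ih =>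
    rw [typistRuns_cons h1 h2]
    have hc' : (PySem.Chars.lowerChar c != c) = true := by
      have := typistSkipLow_head h1; simp [bne, this]
    have hc : pvUp c = true := hc'
    have h2' : typistSkipUp cs1 = d :: cs2 := by
      have he : typistSkipUp (c :: cs1) = typistSkipUp cs1 := by
        simp [typistSkipUp, hc']
      rw [← he, h2]
    have hd : pvUp d = false := typistSkipUp_head h2
    rw [pvTrans_skipLow, h1]
    simp only [List.map_cons, pvTrans, hc]
    rw [pvTrans_skipUp cs1, h2']
    rw [ih]
    simp only [List.map_cons, pvTrans, hd]
    simp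
    ring

-- ===== VERDICT (by name: the statement is the Claim_ definition above) =====
theorem typist_spec : Claim_equal_typist := by
  intro s _
  unfold Spec_typist typist typist_alt
  rw [pvFoldA_eq, pvRuns_eq_trans]
  ring
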